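-- pv_equiv track=rewrite | github.com/seowchiayi/data-structure-and-algorithms | meta3.py | continuous_subarray_sum
-- ===== SOURCE A (Python) =====
-- from typing import List, Optional
--
-- def continuous_subarray_sum(nums: List[int], k: int):
--     remainder = {0: -1}
--     total = 0
--     for i, n in enumerate(nums):
--         total += n
--         r = total % k
--         if r not in remainder:
--             remainder[r] = i
--         elif i - remainder[r] > 1: # ensures subarray has at least two elements
--             return True
--
--     return False
-- ===== SOURCE B (Python) =====
-- def continuous_subarray_sum(nums, k):
--     pref = [0]
--     t = 0
--     for n in nums:
--         t += n
--         pref.append(t % k)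
--     return any(r in pref[i + 2:] for i, r in enumerate(pref))
-- ===== Notes on version B (the rewrite author's own statement) =====
-- stated objective: alternative
-- what changed: Replaces the single-pass remainder-first-seen hashmap with early return by building the full prefix-remainder list and doing a pairwise membership scan over index pairs at distance >= 2.
import Mathlib
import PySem

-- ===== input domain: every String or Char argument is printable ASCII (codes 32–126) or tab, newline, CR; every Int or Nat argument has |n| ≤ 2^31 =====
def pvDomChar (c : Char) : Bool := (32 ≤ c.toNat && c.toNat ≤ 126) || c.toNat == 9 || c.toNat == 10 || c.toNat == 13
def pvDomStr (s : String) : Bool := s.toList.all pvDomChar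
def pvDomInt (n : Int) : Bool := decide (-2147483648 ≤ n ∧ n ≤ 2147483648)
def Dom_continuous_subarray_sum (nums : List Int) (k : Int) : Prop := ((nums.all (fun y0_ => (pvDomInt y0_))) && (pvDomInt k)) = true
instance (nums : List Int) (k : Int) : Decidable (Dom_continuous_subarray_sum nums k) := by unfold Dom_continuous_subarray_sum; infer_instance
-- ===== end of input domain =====

-- B replaces A's one-pass remainder-first-seen hashmap (early return) by building the prefix-remainder
-- list and doing a pairwise membership scan over index pairs at distance >= 2 (alternative, not faster).


-- ===== PORT A =====
-- the for-loop with its early 'return True' as structural recursion; i is the enumerate index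
def pvGoA (nums : List Int) (k : Int) (i : Int) (remainder : PySem.Dict Int Int) (total : Int) : Bool :=
  match nums with
  | [] => false
  | n :: rest =>
    let total := total + n
    let r := PySem.Int.mod total k
    match remainder.get? r with
    | none => pvGoA rest k (i + 1) (remainder.insert r i) total
    | some j => if i - j > 1 then true else pvGoA rest k (i + 1) remainder total

def continuous_subarray_sum (nums : List Int) (k : Int) : Bool :=
  pvGoA nums k 0 (PySem.Dict.empty.insert 0 (-1)) 0

-- ===== PORT B =====
-- pref = [0]; t = 0; for n in nums: t += n; pref.append(t % k)
def pvPref (nums : List Int) (k : Int) : List Int :=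
  (nums.foldl (fun (acc : List Int × Int) n =>
      let t := acc.2 + n
      (acc.1 ++ [PySem.Int.mod t k], t)) ([0], 0)).1

-- any(r in pref[i + 2:] for i, r in enumerate(pref))
def continuous_subarray_sum_alt (nums : List Int) (k : Int) : Bool :=
  let pref := pvPref nums k
  (PySem.List.enumerate pref 0).any (fun p => (PySem.List.slice pref (some (p.1 + 2)) none).contains p.2)

-- ===== PRECONDITION & SPEC =====
-- Pre_ excludes exactly the inputs where A raises ZeroDivisionError: k = 0 with nums nonempty.
def Pre_continuous_subarray_sum (nums : List Int) (k : Int) : Prop := nums = [] ∨ k ≠ 0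
instance (nums : List Int) (k : Int) : Decidable (Pre_continuous_subarray_sum nums k) := by unfold Pre_continuous_subarray_sum; infer_instance
def pvWitness_continuous_subarray_sum : List Int × Int := ([6, 1, 5], 6)

def Spec_continuous_subarray_sum (nums : List Int) (k : Int) (out : Bool) : Prop := out = continuous_subarray_sum_alt nums k
instance (nums : List Int) (k : Int) (out : Bool) : Decidable (Spec_continuous_subarray_sum nums k out) := by unfold Spec_continuous_subarray_sum; infer_instance

-- ===== CLAIM (what is proved, stated in full; the proofs are below) =====
def Claim_equal_continuous_subarray_sum : Prop := ∀ (nums : List Int) (k : Int), Dom_continuous_subarray_sum nums k → Pre_continuous_subarray_sum nums k → Spec_continuous_subarray_sum nums k (continuous_subarray_sum nums k)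

-- ===== LEMMAS AND PROOFS =====

-- the sequence of prefix-sum remainders produced from running total t
def pvRems (k : Int) : Int → List Int → List Int
  | _, [] => []
  | t, n :: rest => PySem.Int.mod (t + n) k :: pvRems k (t + n) rest

-- "some pair of equal remainders at distance ≥ 2 whose right end is at index ≥ s"
def pvHasPair (l : List Int) (s : Nat) : Prop :=
  ∃ m, s ≤ m ∧ m < l.length ∧ ∃ p, p + 2 ≤ m ∧ l[p]? = l[m]?

-- A's dict maps each remainder seen so far to (first position in the remainder list) - 1
def pvDInv (d : PySem.Dict Int Int) (seen : List Int) : Prop :=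
  ∀ r, d.get? r = if r ∈ seen then some ((seen.idxOf r : Int) - 1) else none

theorem pvIdxOf_le_of_getElem? {x : Int} : ∀ (xs : List Int) (p : Nat),
    xs[p]? = some x → xs.idxOf x ≤ p := by
  intro xs
  induction xs with
  | nil => intro p h; simp at h
  | cons a as ih =>
    intro p h
    cases p with
    | zero => simp at h; simp [h]
    | succ q =>
      simp at h
      rw [List.idxOf_cons]
      cases hbe : a == x with
      | false => simpa using Nat.succ_le_succ (ih q h)
      | true => simp

theorem pvHasPair_shift (l : List Int) (s : Nat)
    (h : ∀ p, p + 2 ≤ s → l[p]? ≠ l[s]?) : pvHasPair l s ↔ pvHasPair l (s + 1) := by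
  constructor
  · rintro ⟨m, hm, hlen, p, hp, he⟩
    rcases Nat.eq_or_lt_of_le hm with rfl | hlt
    · exact absurd he (h p hp)
    · exact ⟨m, hlt, hlen, p, hp, he⟩
  · rintro ⟨m, hm, hlen, p, hp, he⟩
    exact ⟨m, by omega, hlen, p, hp, he⟩

theorem pvExtGetLt {seen L : List Int} {r : Int} {p : Nat} (hp : p < seen.length) :
    ((seen ++ [r]) ++ L)[p]? = seen[p]? := by
  rw [List.getElem?_append, if_pos (by simp; omega), List.getElem?_append, if_pos hp]

theorem pvExtGetLen {seen L : List Int} {r : Int} :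
    ((seen ++ [r]) ++ L)[seen.length]? = some r := by
  rw [List.getElem?_append, if_pos (by simp), List.getElem?_append, if_neg (by omega)]
  simp

theorem pvGoA_iff (k : Int) : ∀ (nums seen : List Int) (d : PySem.Dict Int Int) (t : Int),
    pvDInv d seen →
    (pvGoA nums k ((seen.length : Int) - 1) d t = true ↔
      pvHasPair (seen ++ pvRems k t nums) seen.length) := by
  intro nums
  induction nums with
  | nil =>
    intro seen d t _
    simp only [pvGoA, pvRems, List.append_nil, pvHasPair]
    constructor
    · intro h; simp at h
    · rintro ⟨m, hm, hlen, -⟩; omega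
  | cons n rest ih =>
    intro seen d t hinv
    have hlist : seen ++ pvRems k t (n :: rest)
        = (seen ++ [PySem.Int.mod (t + n) k]) ++ pvRems k (t + n) rest := by
      simp [pvRems]
    set r := PySem.Int.mod (t + n) k with hr_def
    by_cases hr : r ∈ seen
    · -- r already seen: dict lookup hits the first occurrence
      have hget : d.get? r = some ((seen.idxOf r : Int) - 1) := by rw [hinv r, if_pos hr]
      have hidx : seen.idxOf r < seen.length := List.idxOf_lt_length_of_mem hr
      show (pvGoA (n :: rest) k ((seen.length : Int) - 1) d t = true ↔ _)
      rw [pvGoA]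
      simp only [← hr_def, hget]
      by_cases hcond : (seen.length : Int) - 1 - ((seen.idxOf r : Int) - 1) > 1
      · rw [if_pos hcond, hlist]
        constructor
        · intro _
          refine ⟨seen.length, le_rfl, by simp, seen.idxOf r, by omega, ?_⟩
          rw [pvExtGetLt hidx, pvExtGetLen, List.getElem?_eq_getElem hidx,
            List.getElem_idxOf hidx]
        · intro _; rfl
      · rw [if_neg hcond]
        have hinv' : pvDInv d (seen ++ [r]) := by
          intro r'
          rw [hinv r']
          by_cases hm : r' ∈ seen
          · rw [if_pos hm, if_pos (by simp [hm]), List.idxOf_append, if_pos hm]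
          · rw [if_neg hm, if_neg (by
              simp only [List.mem_append, List.mem_singleton, not_or]
              exact ⟨hm, fun h => hm (h ▸ hr)⟩)]
        have := ih (seen ++ [r]) d (t + n) hinv'
        rw [List.length_append, List.length_singleton] at this
        have hcast : (seen.length : Int) - 1 + 1 = ((seen.length + 1 : Nat) : Int) - 1 := by
          push_cast; ring
        rw [hcast, this, hlist]
        rw [← pvHasPair_shift]
        intro p hp he
        have hplen : p < seen.length := by omega
        rw [pvExtGetLt hplen, pvExtGetLen] at he
        have := pvIdxOf_le_of_getElem? seen p he
        omega
    · -- r not yet seen: insert it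
      have hget : d.get? r = none := by rw [hinv r, if_neg hr]
      show (pvGoA (n :: rest) k ((seen.length : Int) - 1) d t = true ↔ _)
      rw [pvGoA]
      simp only [← hr_def, hget]
      have hinv' : pvDInv (d.insert r ((seen.length : Int) - 1)) (seen ++ [r]) := by
        intro r'
        rw [PySem.Dict.get?_insert]
        by_cases heq : r' = r
        · subst heq
          rw [if_pos rfl, if_pos (by simp), List.idxOf_append, if_neg hr]
          have : List.idxOf r [r] = 0 := by simp
          rw [this]
          simp
        · rw [if_neg heq, hinv r']
          by_cases hm : r' ∈ seen
          · rw [if_pos hm, if_pos (by simp [hm]), List.idxOf_append, if_pos hm]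
          · rw [if_neg hm, if_neg (by
              simp only [List.mem_append, List.mem_singleton, not_or]
              exact ⟨hm, heq⟩)]
      have := ih (seen ++ [r]) (d.insert r ((seen.length : Int) - 1)) (t + n) hinv'
      rw [List.length_append, List.length_singleton] at this
      have hcast : (seen.length : Int) - 1 + 1 = ((seen.length + 1 : Nat) : Int) - 1 := by
        push_cast; ring
      rw [hcast, this, hlist]
      rw [← pvHasPair_shift]
      intro p hp he
      have hplen : p < seen.length := by omega
      rw [pvExtGetLt hplen, pvExtGetLen] at he
      exact hr (List.mem_of_getElem? he)

theorem pvA_iff (nums : List Int) (k : Int) :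
    (continuous_subarray_sum nums k = true ↔ pvHasPair (0 :: pvRems k 0 nums) 1) := by
  have hinv : pvDInv (PySem.Dict.empty.insert 0 (-1)) [0] := by
    intro r
    rw [PySem.Dict.get?_insert]
    by_cases h : r = (0 : Int)
    · subst h; simp
    · rw [if_neg h, if_neg (by simpa using h)]
      simp [PySem.Dict.get?, PySem.Dict.empty]
  have := pvGoA_iff k nums [0] (PySem.Dict.empty.insert 0 (-1)) 0 hinv
  simpa [continuous_subarray_sum] using this

theorem pvPref_eq (k : Int) : ∀ (nums : List Int) (acc : List Int) (t : Int),
    (nums.foldl (fun (acc : List Int × Int) n =>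
      let t := acc.2 + n
      (acc.1 ++ [PySem.Int.mod t k], t)) (acc, t)).1 = acc ++ pvRems k t nums := by
  intro nums
  induction nums with
  | nil => intro acc t; simp [pvRems]
  | cons n rest ih => intro acc t; simp [pvRems, List.foldl_cons, ih]

theorem pvB_iff (nums : List Int) (k : Int) :
    (continuous_subarray_sum_alt nums k = true ↔ pvHasPair (0 :: pvRems k 0 nums) 0) := by
  have hpref : pvPref nums k = 0 :: pvRems k 0 nums := by
    simpa using pvPref_eq k nums [0] 0
  set l := 0 :: pvRems k 0 nums with hl
  rw [continuous_subarray_sum_alt]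
  rw [show pvPref nums k = l from hpref]
  rw [List.any_eq_true]
  constructor
  · rintro ⟨⟨i, x⟩, hmem, hf⟩
    rw [PySem.List.mem_enumerate_iff] at hmem
    obtain ⟨j, hj, hpair⟩ := hmem
    obtain ⟨hi, hx⟩ := Prod.mk.injEq .. ▸ hpair
    subst hi; subst hx
    simp only at hf
    rw [show (0 : Int) + (j : Int) + 2 = ((j + 2 : Nat) : Int) by push_cast; ring] at hf
    rw [PySem.List.slice_from_natCast] at hf
    rw [List.contains_iff_mem, List.mem_iff_getElem?] at hf
    obtain ⟨mj, hmj⟩ := hf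
    rw [List.getElem?_drop] at hmj
    exact ⟨j + 2 + mj, by omega, (List.getElem?_eq_some_iff.mp hmj).1, j, by omega,
      by rw [hmj, List.getElem?_eq_getElem hj]⟩
  · rintro ⟨m, _, hlen, p, hp, he⟩
    have hplen : p < l.length := by omega
    refine ⟨((p : Int), l[p]), ?_, ?_⟩
    · rw [PySem.List.mem_enumerate_iff]
      exact ⟨p, hplen, by simp⟩
    · simp only
      rw [show (p : Int) + 2 = ((p + 2 : Nat) : Int) by push_cast; ring]
      rw [PySem.List.slice_from_natCast, List.contains_iff_mem, List.mem_iff_getElem?]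
      refine ⟨m - (p + 2), ?_⟩
      rw [List.getElem?_drop, show p + 2 + (m - (p + 2)) = m by omega, ← he,
        List.getElem?_eq_getElem hplen]

-- ===== VERDICT (by name: the statement is the Claim_ definition above) =====
theorem continuous_subarray_sum_spec : Claim_equal_continuous_subarray_sum := by
  intro nums k _ _
  unfold Spec_continuous_subarray_sum
  rw [Bool.eq_iff_iff, pvA_iff, pvB_iff]
  constructor
  · rintro ⟨m, hm, hlen, p, hp, he⟩; exact ⟨m, by omega, hlen, p, hp, he⟩
  · rintro ⟨m, hm, hlen, p, hp, he⟩; exact ⟨m, by omega, hlen, p, hp, he⟩
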